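-- pv_equiv track=rewrite | github.com/adnan-armouti/cs6120 | lesson_6/df.py | get_dominance_frontier
-- ===== SOURCE A (Python) =====
-- def append_dom_tree_postorder(dom_tree, node, out_list):
--     for child in dom_tree.get(node, []):
--         append_dom_tree_postorder(dom_tree, child, out_list)
--     out_list.append(node)
--
-- def get_dominance_frontier(blocks, next_map, immediate_dom, dom_tree):
--     block_names_ordered = [b["name"] for b in blocks]
--     dominance_frontier = {n: set() for n in block_names_ordered}
--     # local
--     for block_name in block_names_ordered:
--         for next_block in next_map.get(block_name, []):
--             if immediate_dom.get(next_block) != block_name: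
--                 dominance_frontier[block_name].add(next_block)
--     # postorder over dom tree
--     postorder = []
--     for root, parent in immediate_dom.items():
--         if parent is None:
--             append_dom_tree_postorder(dom_tree, root, postorder)
--     # upward
--     for block_name in postorder:
--         for child in dom_tree.get(block_name, []):
--             for n in dominance_frontier[child]:
--                 if immediate_dom.get(n) != block_name:
--                     dominance_frontier[block_name].add(n)
--     return dominance_frontier
-- ===== SOURCE B (Python) =====
-- def get_dominance_frontier(blocks, next_map, immediate_dom, dom_tree):
--     block_names_ordered = [b["name"] for b in blocks]
--     # local part directly as a dict of set-comprehensions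
--     dominance_frontier = {
--         n: {s for s in next_map.get(n, []) if immediate_dom.get(s) != n}
--         for n in block_names_ordered
--     }
--     # postorder = reverse of a right-to-left preorder, via an explicit stack
--     stack = [root for root, parent in immediate_dom.items() if parent is None]
--     visit = []
--     while stack:
--         node = stack.pop()
--         visit.append(node)
--         stack.extend(dom_tree.get(node, []))
--     # upward pass: children-first order over the reversed visit list
--     for b in reversed(visit):
--         for c in dom_tree.get(b, []):
--             for n in dominance_frontier[c]:
--                 if immediate_dom.get(n) != b:
--                     dominance_frontier[b].add(n)
--     return dominance_frontier
-- ===== Notes on version B (the rewrite author's own statement) =====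
-- stated objective: alternative
-- what changed: B builds the local frontiers as a dict of filtered-set comprehensions and replaces the recursive postorder helper by an explicit-stack right-to-left preorder whose reverse is the postorder; the upward propagation then runs over that reversed visit list. Pre_ excludes exactly the inputs where A fails to return (missing 'name' key, a dom-tree cycle reachable from a None-parent root, a KeyError in the upward pass); …
-- outside the precondition, e.g. on get_dominance_frontier([{'name': 'b'}], {}, {'a': None}, {'a': ['b']}): A returns {'b': set()}, B returns {'b': set()}
import Mathlib
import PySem

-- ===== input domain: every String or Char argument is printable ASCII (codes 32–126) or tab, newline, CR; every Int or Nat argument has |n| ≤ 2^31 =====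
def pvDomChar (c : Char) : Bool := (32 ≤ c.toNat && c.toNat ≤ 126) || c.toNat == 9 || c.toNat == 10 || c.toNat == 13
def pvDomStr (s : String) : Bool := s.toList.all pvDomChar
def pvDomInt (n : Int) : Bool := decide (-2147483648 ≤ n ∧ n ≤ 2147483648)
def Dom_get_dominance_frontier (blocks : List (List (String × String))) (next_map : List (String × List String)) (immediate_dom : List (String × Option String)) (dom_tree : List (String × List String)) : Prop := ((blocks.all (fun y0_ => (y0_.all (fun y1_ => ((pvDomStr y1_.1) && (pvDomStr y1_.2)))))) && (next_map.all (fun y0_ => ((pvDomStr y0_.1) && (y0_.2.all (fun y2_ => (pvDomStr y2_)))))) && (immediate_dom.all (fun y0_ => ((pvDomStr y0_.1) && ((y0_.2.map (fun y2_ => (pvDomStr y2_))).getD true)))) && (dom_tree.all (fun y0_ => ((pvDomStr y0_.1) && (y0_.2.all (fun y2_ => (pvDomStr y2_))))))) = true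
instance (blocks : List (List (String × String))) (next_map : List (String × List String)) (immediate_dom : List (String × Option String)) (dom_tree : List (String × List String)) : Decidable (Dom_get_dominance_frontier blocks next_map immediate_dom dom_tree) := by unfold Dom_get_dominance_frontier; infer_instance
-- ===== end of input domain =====

-- B changes A's traversal (explicit-stack reversed preorder instead of recursive postorder) and
-- builds the local frontiers as one comprehension-style insert pass (objective: alternative).

-- immediate_dom.get(k): dict with Option-valued entries; a missing key and a None value both read as none
def pvIdomGet (d : PySem.Dict String (Option String)) (k : String) : Option String :=
  (d.get? k).getD none

-- ===== PORT A =====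
-- append_dom_tree_postorder, with a fuel counter as a pure totality guard (Python recursion is
-- unbounded; under Pre_ the recursion depth is < fuel, so the guard branch is never taken)
def pvPostA (dt : PySem.Dict String (List String)) : Nat → String → List String → List String
  | 0, _, out => out
  | f+1, node, out =>
      ((dt.getD node []).foldl (fun acc c => pvPostA dt f c acc) out) ++ [node]

def get_dominance_frontier (blocks : List (List (String × String))) (next_map : List (String × List String)) (immediate_dom : List (String × Option String)) (dom_tree : List (String × List String)) : List (String × List String) :=
  let nm := PySem.Dict.ofList next_map
  let idom := PySem.Dict.ofList immediate_dom
  let dt := PySem.Dict.ofList dom_tree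
  -- block_names_ordered = [b["name"] for b in blocks]   (b["name"] exact under Pre_: key present)
  let names := blocks.map (fun b => (PySem.Dict.ofList b).getD "name" "")
  -- dominance_frontier = {n: set() for n in block_names_ordered}
  let df0 : PySem.Dict String (PySem.Set String) :=
    names.foldl (fun (d : PySem.Dict String (PySem.Set String)) n => d.insert n PySem.Set.empty) PySem.Dict.empty
  -- local pass (df[bn].add exact under Pre_: bn is a key of df)
  let df1 := names.foldl (fun d bn =>
      (nm.getD bn []).foldl (fun d nb =>
        if pvIdomGet idom nb != some bn then d.modify bn PySem.Set.empty (fun s => s.add nb) else d) d) df0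
  -- postorder over dom tree
  let postorder := idom.items.foldl (fun po rp =>
      if rp.2.isNone then pvPostA dt (dom_tree.length + 1) rp.1 po else po) []
  -- upward pass (set iterated is a snapshot; exact under Pre_, where child ≠ block_name)
  let df2 := postorder.foldl (fun d bn =>
      (dt.getD bn []).foldl (fun d c =>
        (d.getD c PySem.Set.empty).foldl (fun d2 n =>
          if pvIdomGet idom n != some bn then d2.modify bn PySem.Set.empty (fun s => s.add n) else d2) d) d) df1
  df2.items

-- ===== PORT B =====
-- transitive-closure machinery: plain graph reachability over the dom-tree edges (one expansion
-- step over a set of nodes, saturated after keys.length + 2 rounds — proved below).  This is a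
-- set fixpoint, not a re-run of either port's traversal (the ports build ORDERED postorder
-- lists); it is used only inside pvRank, which feeds the termination guard of the stack loop,
-- and by Pre_, where reachability and acyclicity have no iteration-free decidable form.
def pvStep (dt : PySem.Dict String (List String)) (S : PySem.Set String) : PySem.Set String :=
  S.foldl (fun T m => PySem.Set.update T (dt.getD m [])) S

def pvIter (dt : PySem.Dict String (List String)) : Nat → PySem.Set String → PySem.Set String
  | 0, S => S
  | k+1, S => pvIter dt k (pvStep dt S)

def pvClosFrom (dt : PySem.Dict String (List String)) (l : List String) : PySem.Set String :=
  pvIter dt (dt.keys.length + 2) (PySem.Set.ofList l)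

def pvClos (dt : PySem.Dict String (List String)) (n : String) : PySem.Set String :=
  pvClosFrom dt [n]

-- rank of a node = number of dict keys in its closure; strictly decreasing parent → child on
-- the acyclic reachable part (proved below), it powers the termination potential of the loop
def pvRank (dt : PySem.Dict String (List String)) (n : String) : Nat :=
  ((pvClos dt n).filter (fun x => dt.contains x)).length

def pvCmax (dt : PySem.Dict String (List String)) : Nat :=
  dt.items.foldl (fun m p => max m p.2.length) 0

def pvW (dt : PySem.Dict String (List String)) (n : String) : Nat :=
  (pvCmax dt + 1) ^ (pvRank dt n)

def pvPhi (dt : PySem.Dict String (List String)) (st : List String) : Nat :=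
  (st.map (pvW dt)).sum

-- while stack: node = stack.pop(); visit.append(node); stack.extend(dom_tree.get(node, []))
-- (head of the Lean list = top of the Python stack, so extend pushes the reversed child list;
--  the dite is a termination guard only: under Pre_ the potential always drops)
def pvLoopB (dt : PySem.Dict String (List String)) (stack visit : List String) : List String :=
  match stack with
  | [] => visit
  | n :: st =>
      let st' := (dt.getD n []).reverse ++ st
      if h : pvPhi dt st' < pvPhi dt (n :: st) then
        pvLoopB dt st' (visit ++ [n])
      else visit ++ [n]
termination_by pvPhi dt stack
decreasing_by exact h

def get_dominance_frontier_alt (blocks : List (List (String × String))) (next_map : List (String × List String)) (immediate_dom : List (String × Option String)) (dom_tree : List (String × List String)) : List (String × List String) :=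
  let nm := PySem.Dict.ofList next_map
  let idom := PySem.Dict.ofList immediate_dom
  let dt := PySem.Dict.ofList dom_tree
  let names := blocks.map (fun b => (PySem.Dict.ofList b).getD "name" "")
  -- {n: {s for s in next_map.get(n, []) if immediate_dom.get(s) != n} for n in names}
  let df1 : PySem.Dict String (PySem.Set String) :=
    names.foldl (fun d n =>
      d.insert n (PySem.Set.ofList ((nm.getD n []).filter (fun s => pvIdomGet idom s != some n)))) PySem.Dict.empty
  -- stack = [r for r, p in immediate_dom.items() if p is None]  (top of stack = last element)
  let stack0 := (((idom.items.filter (fun rp => rp.2.isNone)).map (fun rp => rp.1))).reverse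
  let visit := pvLoopB dt stack0 []
  -- for b in reversed(visit): for c in dom_tree.get(b, []): for n in df[c]: if idom.get(n) != b: df[b].add(n)
  let df2 := visit.reverse.foldl (fun d b =>
      (dt.getD b []).foldl (fun d c =>
        (d.getD c PySem.Set.empty).foldl (fun d2 n =>
          if pvIdomGet idom n != some b then d2.modify b PySem.Set.empty (fun s => s.add n) else d2) d) d) df1
  df2.items

-- ===== PRECONDITION & SPEC =====
-- helpers for Pre_: the block-name list, the None-parent roots and the set of dom-tree nodes
-- reachable from them (pvClosFrom is saturated graph reachability — a closed-form property of
-- the input edge relation, independent of either port's traversal)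
def pvNames (blocks : List (List (String × String))) : List String :=
  blocks.map (fun b => (PySem.Dict.ofList b).getD "name" "")

def pvRoots (immediate_dom : List (String × Option String)) : List String :=
  ((PySem.Dict.ofList immediate_dom).items.filter (fun rp => rp.2.isNone)).map (fun rp => rp.1)

def pvReach (immediate_dom : List (String × Option String)) (dom_tree : List (String × List String)) : PySem.Set String :=
  pvClosFrom (PySem.Dict.ofList dom_tree) (pvRoots immediate_dom)

-- Pre_ excludes exactly the inputs where the Python A fails to return: a block without a "name"
-- key (KeyError), a dom-tree cycle reachable from a None-parent root (RecursionError), and a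
-- KeyError in the upward pass (a reachable node's child, or a reachable node receiving an
-- element, that is not a block name); because "an element is actually propagated" is
-- data-dependent and not closed-form, the third clause conservatively requires every reachable
-- node WITH children to be a block name, which also excludes rare inputs where nothing is
-- propagated into the missing key and A returns — there B returns the same value (see claim cite).
def Pre_get_dominance_frontier (blocks : List (List (String × String))) (next_map : List (String × List String)) (immediate_dom : List (String × Option String)) (dom_tree : List (String × List String)) : Prop :=
  (∀ b ∈ blocks, "name" ∈ (PySem.Dict.ofList b).keys) ∧
  (∀ n ∈ pvReach immediate_dom dom_tree, ∀ c ∈ (PySem.Dict.ofList dom_tree).getD n [],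
      n ∉ pvClos (PySem.Dict.ofList dom_tree) c) ∧
  (∀ n ∈ pvReach immediate_dom dom_tree,
      (PySem.Dict.ofList dom_tree).getD n [] ≠ [] →
      n ∈ pvNames blocks ∧ ∀ c ∈ (PySem.Dict.ofList dom_tree).getD n [], c ∈ pvNames blocks)

instance (blocks : List (List (String × String))) (next_map : List (String × List String)) (immediate_dom : List (String × Option String)) (dom_tree : List (String × List String)) : Decidable (Pre_get_dominance_frontier blocks next_map immediate_dom dom_tree) := by
  unfold Pre_get_dominance_frontier; infer_instance

def pvWitness_get_dominance_frontier : (List (List (String × String))) × (List (String × List String)) × (List (String × Option String)) × (List (String × List String)) :=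
  ([[("name", "a")], [("name", "b")]], [("a", ["b"])], [("a", none), ("b", some "a")], [("a", ["b"])])

def Spec_get_dominance_frontier (blocks : List (List (String × String))) (next_map : List (String × List String)) (immediate_dom : List (String × Option String)) (dom_tree : List (String × List String)) (out : List (String × List String)) : Prop := out = get_dominance_frontier_alt blocks next_map immediate_dom dom_tree
instance (blocks : List (List (String × String))) (next_map : List (String × List String)) (immediate_dom : List (String × Option String)) (dom_tree : List (String × List String)) (out : List (String × List String)) : Decidable (Spec_get_dominance_frontier blocks next_map immediate_dom dom_tree out) := by unfold Spec_get_dominance_frontier; infer_instance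

-- ===== CLAIM (what is proved, stated in full; the proofs are below) =====
def Claim_equal_get_dominance_frontier : Prop := ∀ (blocks : List (List (String × String))) (next_map : List (String × List String)) (immediate_dom : List (String × Option String)) (dom_tree : List (String × List String)), Dom_get_dominance_frontier blocks next_map immediate_dom dom_tree → Pre_get_dominance_frontier blocks next_map immediate_dom dom_tree → Spec_get_dominance_frontier blocks next_map immediate_dom dom_tree (get_dominance_frontier blocks next_map immediate_dom dom_tree)

-- ===== LEMMAS AND PROOFS =====

-- ---------- closure machinery ----------
lemma mem_foldl_update (dt : PySem.Dict String (List String)) (x : String) :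
    ∀ (l : List String) (T : PySem.Set String),
      x ∈ l.foldl (fun T m => PySem.Set.update T (dt.getD m [])) T ↔
        x ∈ T ∨ ∃ m ∈ l, x ∈ dt.getD m [] := by
  intro l
  induction l with
  | nil => intro T; simp
  | cons a l ih =>
      intro T
      simp only [List.foldl_cons]
      rw [ih, PySem.Set.mem_update]
      constructor
      · rintro (⟨h | h⟩ | ⟨m, hm, hx⟩)
        · exact Or.inl h
        · exact Or.inr ⟨a, by simp, h⟩
        · exact Or.inr ⟨m, by simp [hm], hx⟩
      · rintro (h | ⟨m, hm, hx⟩)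
        · exact Or.inl (Or.inl h)
        · rcases List.mem_cons.mp hm with rfl | hm
          · exact Or.inl (Or.inr hx)
          · exact Or.inr ⟨m, hm, hx⟩

lemma mem_pvStep (dt : PySem.Dict String (List String)) (S : PySem.Set String) (x : String) :
    x ∈ pvStep dt S ↔ x ∈ S ∨ ∃ m ∈ S, x ∈ dt.getD m [] :=
  mem_foldl_update dt x S S

lemma nodup_foldl_update (dt : PySem.Dict String (List String)) :
    ∀ (l : List String) (T : PySem.Set String), T.Nodup →
      (l.foldl (fun T m => PySem.Set.update T (dt.getD m [])) T).Nodup := by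
  intro l
  induction l with
  | nil => intro T h; exact h
  | cons a l ih =>
      intro T h
      exact ih _ (PySem.Set.nodup_update T (dt.getD a []) h)

lemma nodup_pvIter (dt : PySem.Dict String (List String)) :
    ∀ (k : Nat) (S : PySem.Set String), S.Nodup → (pvIter dt k S).Nodup := by
  intro k
  induction k with
  | zero => intro S h; exact h
  | succ k ih => intro S h; exact ih _ (nodup_foldl_update dt S S h)

lemma mem_pvIter_of_mem (dt : PySem.Dict String (List String)) :
    ∀ (k : Nat) (S : PySem.Set String) (x : String), x ∈ S → x ∈ pvIter dt k S := by
  intro k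
  induction k with
  | zero => intro S x h; exact h
  | succ k ih =>
      intro S x h
      exact ih _ x ((mem_pvStep dt S x).mpr (Or.inl h))

lemma pvIter_succ_right (dt : PySem.Dict String (List String)) :
    ∀ (k : Nat) (S : PySem.Set String), pvIter dt (k+1) S = pvStep dt (pvIter dt k S) := by
  intro k
  induction k with
  | zero => intro S; rfl
  | succ k ih =>
      intro S
      show pvIter dt (k+1) (pvStep dt S) = _
      rw [ih (pvStep dt S)]
      rfl

lemma mem_pvIter_closed (dt : PySem.Dict String (List String)) (P : String → Prop)
    (hcl : ∀ m, P m → ∀ c ∈ dt.getD m [], P c) :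
    ∀ (k : Nat) (S : PySem.Set String), (∀ x ∈ S, P x) → ∀ x ∈ pvIter dt k S, P x := by
  intro k
  induction k with
  | zero => intro S h x hx; exact h x hx
  | succ k ih =>
      intro S h
      apply ih
      intro x hx
      rcases (mem_pvStep dt S x).mp hx with hx | ⟨m, hm, hx⟩
      · exact h x hx
      · exact hcl m (h m hm) x hx

lemma contains_of_getD_ne (dt : PySem.Dict String (List String)) (n : String)
    (h : dt.getD n [] ≠ []) : dt.contains n = true := by
  cases hget : dt.get? n with
  | none =>
      exfalso
      rw [PySem.Dict.getD_eq_get?_getD, hget] at h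
      simp at h
  | some v =>
      rw [PySem.Dict.contains_eq_isSome_get?, hget]
      rfl

-- saturation: after keys.length + 2 rounds the iterated set is closed under child steps
lemma pvClosFrom_closed (dt : PySem.Dict String (List String)) (l : List String) :
    ∀ x ∈ pvClosFrom dt l, ∀ c ∈ dt.getD x [], c ∈ pvClosFrom dt l := by
  set K := dt.keys.length with hK
  set S0 := PySem.Set.ofList l with hS0
  have hnd0 : S0.Nodup := PySem.Set.nodup_ofList l
  set S : Nat → PySem.Set String := fun k => pvIter dt k S0 with hS
  have hndk : ∀ k, (S k).Nodup := fun k => nodup_pvIter dt k S0 hnd0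
  have hsub : ∀ k x, x ∈ S k → x ∈ S (k+1) := by
    intro k x hx
    show x ∈ pvIter dt (k+1) S0
    rw [pvIter_succ_right]
    exact (mem_pvStep dt (S k) x).mpr (Or.inl hx)
  set ks : Nat → List String := fun k => (S k).filter (fun x => dt.contains x) with hks
  have hndks : ∀ k, (ks k).Nodup := fun k => (hndk k).filter _
  have hmemks : ∀ k x, x ∈ ks k ↔ x ∈ S k ∧ dt.contains x = true := by
    intro k x; simp [hks, List.mem_filter]
  have hsubks : ∀ k x, x ∈ ks k → x ∈ ks (k+1) := by
    intro k x hx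
    rw [hmemks] at hx ⊢
    exact ⟨hsub k x hx.1, hx.2⟩
  set a : Nat → Nat := fun k => (ks k).length with ha
  have hamono : ∀ k, a k ≤ a (k+1) := by
    intro k
    exact ((hndks k).subperm (fun x hx => hsubks k x hx)).length_le
  have habound : ∀ k, a k ≤ K := by
    intro k
    apply List.Subperm.length_le
    apply (hndks k).subperm
    intro x hx
    exact (PySem.Dict.contains_iff_mem_keys dt x).mp ((hmemks k x).mp hx).2
  have hpigeon : ∃ i, i ≤ K ∧ a (i+1) = a i := by
    by_contra hcon
    push_neg at hcon
    have hstrict : ∀ i, i ≤ K → a i + 1 ≤ a (i+1) := by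
      intro i hi
      have := hcon i hi
      have := hamono i
      omega
    have haux : ∀ j, j ≤ K + 1 → j ≤ a j := by
      intro j
      induction j with
      | zero => intro _; omega
      | succ j ihj =>
          intro hj
          have h1 := ihj (by omega)
          have h2 := hstrict j (by omega)
          omega
    have := haux (K+1) le_rfl
    have := habound (K+1)
    omega
  obtain ⟨i, hiK, hieq⟩ := hpigeon
  -- equal lengths of nodup sublists ⇒ same members
  have hkeq : ∀ x, x ∈ ks (i+1) ↔ x ∈ ks i := by
    intro x
    constructor
    · intro hx
      have hperm : (ks i).Perm (ks (i+1)) := by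
        apply List.Subperm.perm_of_length_le
        · exact (hndks i).subperm (fun y hy => hsubks i y hy)
        · exact le_of_eq hieq
      exact hperm.mem_iff.mpr hx
    · exact hsubks i x
  have hkeydown : ∀ x, x ∈ S (i+1) → dt.getD x [] ≠ [] → x ∈ S i := by
    intro x hx hne
    have : x ∈ ks (i+1) := (hmemks _ x).mpr ⟨hx, contains_of_getD_ne dt x hne⟩
    exact ((hmemks i x).mp ((hkeq x).mp this)).1
  have hstepeq : ∀ x, x ∈ S (i+2) ↔ x ∈ S (i+1) := by
    intro x
    constructor
    · intro hx
      have : x ∈ pvStep dt (S (i+1)) := by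
        have : S (i+2) = pvStep dt (S (i+1)) := pvIter_succ_right dt (i+1) S0
        rwa [← this]
      rcases (mem_pvStep dt (S (i+1)) x).mp this with hx' | ⟨m, hm, hx'⟩
      · exact hx'
      · have hmne : dt.getD m [] ≠ [] := by intro h0; rw [h0] at hx'; simp at hx'
        have hmi : m ∈ S i := hkeydown m hm hmne
        have : x ∈ pvStep dt (S i) := (mem_pvStep dt (S i) x).mpr (Or.inr ⟨m, hmi, hx'⟩)
        have hse : S (i+1) = pvStep dt (S i) := pvIter_succ_right dt i S0
        rwa [← hse] at this
    · exact hsub (i+1) x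
  have hpersist : ∀ j x, x ∈ S (i+1+j) ↔ x ∈ S (i+1) := by
    intro j
    induction j with
    | zero => intro x; rfl
    | succ j ihj =>
        intro x
        have hse : S (i+1+j+1) = pvStep dt (S (i+1+j)) := pvIter_succ_right dt (i+1+j) S0
        have hse1 : S (i+2) = pvStep dt (S (i+1)) := pvIter_succ_right dt (i+1) S0
        show x ∈ S (i+1+j+1) ↔ _
        rw [hse, mem_pvStep]
        have hmem2 : x ∈ S (i+2) ↔ x ∈ S (i+1) ∨ ∃ m ∈ S (i+1), x ∈ dt.getD m [] := by
          rw [hse1, mem_pvStep]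
        constructor
        · rintro (hx | ⟨m, hm, hx⟩)
          · exact (ihj x).mp hx
          · exact (hstepeq x).mp (hmem2.mpr (Or.inr ⟨m, (ihj m).mp hm, hx⟩))
        · intro hx
          exact Or.inl ((ihj x).mpr hx)
  intro x hx c hc
  have hxK : x ∈ S (K+2) := hx
  have hxi : x ∈ S (i+1) := by
    have : K + 2 = i + 1 + (K + 1 - i) := by omega
    rw [this] at hxK
    exact (hpersist (K + 1 - i) x).mp hxK
  have hcstep : c ∈ S (i+2) := by
    have hse1 : S (i+2) = pvStep dt (S (i+1)) := pvIter_succ_right dt (i+1) S0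
    rw [hse1]
    exact (mem_pvStep dt (S (i+1)) c).mpr (Or.inr ⟨x, hxi, hc⟩)
  have hci : c ∈ S (i+1) := (hstepeq c).mp hcstep
  show c ∈ S (K+2)
  have : K + 2 = i + 1 + (K + 1 - i) := by omega
  rw [this]
  exact (hpersist (K + 1 - i) c).mpr hci

lemma mem_pvClosFrom_of_mem (dt : PySem.Dict String (List String)) (l : List String)
    (x : String) (hx : x ∈ l) : x ∈ pvClosFrom dt l :=
  mem_pvIter_of_mem dt _ _ x ((PySem.Set.mem_ofList l x).mpr hx)

lemma pvClosFrom_subset_closed (dt : PySem.Dict String (List String)) (l : List String)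
    (T : PySem.Set String) (hl : ∀ x ∈ l, x ∈ T)
    (hcl : ∀ m ∈ T, ∀ c ∈ dt.getD m [], c ∈ T) :
    ∀ x ∈ pvClosFrom dt l, x ∈ T := by
  apply mem_pvIter_closed dt (fun x => x ∈ T) hcl
  intro x hx
  exact hl x ((PySem.Set.mem_ofList l x).mp hx)

-- ---------- abbreviations ----------
-- pvHR: on the set R, every dom-tree child has strictly smaller rank than its parent and stays in R
def pvHR (dt : PySem.Dict String (List String)) (R : PySem.Set String) : Prop :=
  ∀ n ∈ R, ∀ c ∈ dt.getD n [], pvRank dt c < pvRank dt n ∧ c ∈ R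

lemma pvRank_lt_of_child (dt : PySem.Dict String (List String)) (n c : String) (hc : c ∈ dt.getD n []) (hacy : n ∉ pvClos dt c) :
    pvRank dt c < pvRank dt n := by
  have hnk : dt.contains n = true :=
    contains_of_getD_ne dt n (by intro h0; rw [h0] at hc; simp at hc)
  have hnn : n ∈ pvClos dt n := mem_pvClosFrom_of_mem dt [n] n (by simp)
  have hclosedn : ∀ x ∈ pvClos dt n, ∀ c' ∈ dt.getD x [], c' ∈ pvClos dt n :=
    pvClosFrom_closed dt [n]
  have hcn : c ∈ pvClos dt n := hclosedn n hnn c hc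
  have hsubset : ∀ x ∈ pvClos dt c, x ∈ pvClos dt n :=
    pvClosFrom_subset_closed dt [c] (pvClos dt n) (by intro x hx; simp at hx; rwa [hx]) hclosedn
  -- filtered key lists
  set fc := (pvClos dt c).filter (fun x => dt.contains x) with hfc
  set fn := (pvClos dt n).filter (fun x => dt.contains x) with hfn
  have hndc : fc.Nodup := (nodup_pvIter dt _ _ (PySem.Set.nodup_ofList [c])).filter _
  have hndn : fn.Nodup := (nodup_pvIter dt _ _ (PySem.Set.nodup_ofList [n])).filter _
  have hnin : n ∈ fn := List.mem_filter.mpr ⟨hnn, hnk⟩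
  have hsubf : ∀ x ∈ fc, x ∈ fn.erase n := by
    intro x hx
    have hx' := List.mem_filter.mp hx
    have hxn : x ≠ n := by
      intro h0
      exact hacy (h0 ▸ hx'.1)
    exact List.mem_erase_of_ne hxn |>.mpr (List.mem_filter.mpr ⟨hsubset x hx'.1, hx'.2⟩)
  have hle : fc.length ≤ (fn.erase n).length :=
    (hndc.subperm (fun x hx => hsubf x hx)).length_le
  have hlen : (fn.erase n).length = fn.length - 1 := List.length_erase_of_mem hnin
  have hpos : 1 ≤ fn.length := List.length_pos_of_mem hnin
  show fc.length < fn.length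
  omega

-- ---------- pure postorder ----------
def pvPost (dt : PySem.Dict String (List String)) (n : String) : List String :=
  ((dt.getD n []).attach.flatMap
    (fun c => if h : pvRank dt c.1 < pvRank dt n then pvPost dt c.1 else [])) ++ [n]
termination_by pvRank dt n
decreasing_by exact h

lemma pvPost_eq (dt : PySem.Dict String (List String)) (n : String)
    (hch : ∀ c ∈ dt.getD n [], pvRank dt c < pvRank dt n) :
    pvPost dt n = (dt.getD n []).flatMap (pvPost dt) ++ [n] := by
  rw [pvPost]
  congr 1
  rw [List.flatMap_def, List.flatMap_def]
  have h1 : ((dt.getD n []).attach.map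
      (fun c => if h : pvRank dt c.1 < pvRank dt n then pvPost dt c.1 else []))
      = (dt.getD n []).attach.map (fun c => pvPost dt c.1) := by
    apply List.map_congr_left
    intro a _
    exact dif_pos (hch a.1 a.2)
  rw [h1]
  have h2 : (dt.getD n []).attach.map (fun c => pvPost dt c.1)
      = ((dt.getD n []).attach.map Subtype.val).map (pvPost dt) := by
    rw [List.map_map]; rfl
  rw [h2, List.attach_map_subtype_val]

def pvRPost (dt : PySem.Dict String (List String)) (n : String) : List String :=
  (pvPost dt n).reverse

lemma pvRPost_eq (dt : PySem.Dict String (List String)) (n : String)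
    (hch : ∀ c ∈ dt.getD n [], pvRank dt c < pvRank dt n) :
    pvRPost dt n = n :: (dt.getD n []).reverse.flatMap (pvRPost dt) := by
  unfold pvRPost
  rw [pvPost_eq dt n hch, List.reverse_append, List.reverse_flatMap]
  rfl

-- ---------- A's fueled recursion computes pvPost ----------
lemma pvPostA_eq (dt : PySem.Dict String (List String)) (R : PySem.Set String) (H : pvHR dt R) :
    ∀ (f : Nat) (n : String) (out : List String), n ∈ R → pvRank dt n < f →
      pvPostA dt f n out = out ++ pvPost dt n := by
  intro f
  induction f with
  | zero => intro n out _ h; omega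
  | succ f ih =>
      intro n out hnR h
      rw [pvPostA, pvPost_eq dt n (fun c hc => (H n hnR c hc).1)]
      have hfold : ∀ (l : List String),
          (∀ c ∈ l, pvRank dt c < pvRank dt n ∧ c ∈ R) → ∀ out,
          l.foldl (fun acc c => pvPostA dt f c acc) out = out ++ l.flatMap (pvPost dt) := by
        intro l hl
        induction l with
        | nil => intro out; simp
        | cons c l ihl =>
            intro out
            simp only [List.foldl_cons, List.flatMap_cons]
            rw [ih c out (hl c (by simp)).2 (by have := (hl c (by simp)).1; omega),
              ihl (fun x hx => hl x (by simp [hx])) (out ++ pvPost dt c)]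
            simp [List.append_assoc]
      rw [hfold _ (fun c hc => H n hnR c hc) out, List.append_assoc]

lemma pvRank_le (dt : PySem.Dict String (List String)) (n : String) :
    pvRank dt n ≤ dt.keys.length := by
  unfold pvRank
  apply List.Subperm.length_le
  apply List.Nodup.subperm ((nodup_pvIter dt _ _ (PySem.Set.nodup_ofList [n])).filter _)
  intro x hx
  exact (PySem.Dict.contains_iff_mem_keys dt x).mp (List.mem_filter.mp hx).2

lemma pvKlen_le (l : List (String × List String)) :
    (PySem.Dict.ofList l).keys.length ≤ l.length := by
  have haux : ∀ (ps : List (String × List String)) (d : PySem.Dict String (List String)),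
      (ps.foldl (fun acc p => acc.insert p.1 p.2) d).items.length ≤ d.items.length + ps.length := by
    intro ps
    induction ps with
    | nil => intro d; simp
    | cons p ps ihp =>
        intro d
        have h1 := ihp (d.insert p.1 p.2)
        have h2 : (d.insert p.1 p.2).items.length ≤ d.items.length + 1 := by
          have := PySem.Dict.size_insert d p.1 p.2
          unfold PySem.Dict.size at this
          split at this <;> omega
        simp only [List.foldl_cons, List.length_cons]
        omega
  have := haux l PySem.Dict.empty
  simp only [PySem.Dict.keys, List.length_map]
  unfold PySem.Dict.ofList PySem.Dict.update
  simpa [PySem.Dict.empty] using this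

-- roots fold of A equals flatMap pvPost over the filtered roots
lemma pvRootsFold (dt : PySem.Dict String (List String)) (R : PySem.Set String)
    (H : pvHR dt R) (F : Nat) (hF : dt.keys.length < F) :
    ∀ (l : List (String × Option String)) (acc : List String),
      (∀ p ∈ l, p.2.isNone = true → p.1 ∈ R) →
      l.foldl (fun po rp => if rp.2.isNone then pvPostA dt F rp.1 po else po) acc
        = acc ++ ((l.filter (fun rp => rp.2.isNone)).map (fun rp => rp.1)).flatMap (pvPost dt) := by
  intro l
  induction l with
  | nil => intro acc _; simp
  | cons p l ih =>
      intro acc hR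
      by_cases hp : p.2.isNone
      · simp only [List.foldl_cons, List.filter_cons, hp, if_pos]
        rw [ih _ (fun q hq hq2 => hR q (by simp [hq]) hq2),
          pvPostA_eq dt R H F p.1 acc (hR p (by simp) hp) (by have := pvRank_le dt p.1; omega)]
        simp [List.append_assoc]
      · simp only [List.foldl_cons, List.filter_cons, hp]
        simp only [Bool.false_eq_true, if_false]
        rw [ih _ (fun q hq hq2 => hR q (by simp [hq]) hq2)]

-- ---------- potential for the stack loop ----------
lemma pvCmax_bound (dt : PySem.Dict String (List String)) (n : String) :
    (dt.getD n []).length ≤ pvCmax dt := by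
  cases hget : dt.get? n with
  | none => rw [PySem.Dict.getD_eq_get?_getD, hget]; simp
  | some v =>
      have hmem := PySem.Dict.mem_items_of_get?_eq_some dt hget
      have hv : dt.getD n [] = v := by rw [PySem.Dict.getD_eq_get?_getD, hget]; rfl
      rw [hv]
      unfold pvCmax
      have haux1 : ∀ (l : List (String × List String)) (a : Nat),
          a ≤ l.foldl (fun m p => max m p.2.length) a := by
        intro l
        induction l with
        | nil => intro a; simp
        | cons q l ihq => intro a; exact le_trans (le_max_left _ _) (ihq _)
      have haux2 : ∀ (l : List (String × List String)) (a : Nat), (n, v) ∈ l →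
          v.length ≤ l.foldl (fun m p => max m p.2.length) a := by
        intro l
        induction l with
        | nil => intro a h; simp at h
        | cons q l ihq =>
            intro a h
            rcases List.mem_cons.mp h with h | h
            · subst h; exact le_trans (le_max_right _ _) (haux1 l _)
            · exact ihq _ h
      exact haux2 _ 0 hmem

lemma pvRank_pos (dt : PySem.Dict String (List String)) (n : String)
    (h : dt.getD n [] ≠ []) : 1 ≤ pvRank dt n := by
  have hc : dt.contains n = true := contains_of_getD_ne dt n h
  have hnn : n ∈ pvClos dt n := mem_pvClosFrom_of_mem dt [n] n (by simp)
  have : n ∈ (pvClos dt n).filter (fun x => dt.contains x) := List.mem_filter.mpr ⟨hnn, hc⟩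
  exact List.length_pos_of_mem this

lemma pvW_pos (dt : PySem.Dict String (List String)) (n : String) : 1 ≤ pvW dt n :=
  Nat.one_le_pow _ _ (by omega)

lemma pvPhi_append (dt : PySem.Dict String (List String)) (a b : List String) :
    pvPhi dt (a ++ b) = pvPhi dt a + pvPhi dt b := by
  unfold pvPhi; rw [List.map_append, List.sum_append]

lemma pvPhi_step (dt : PySem.Dict String (List String)) (n : String)
    (hch : ∀ c ∈ dt.getD n [], pvRank dt c < pvRank dt n) (st : List String) :
    pvPhi dt ((dt.getD n []).reverse ++ st) < pvPhi dt (n :: st) := by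
  rw [pvPhi_append]
  have hcons : pvPhi dt (n :: st) = pvW dt n + pvPhi dt st := by
    unfold pvPhi; simp
  rw [hcons]
  have hrev : pvPhi dt (dt.getD n []).reverse = pvPhi dt (dt.getD n []) := by
    unfold pvPhi
    rw [List.map_reverse, List.sum_reverse]
  rw [hrev]
  have hmain : pvPhi dt (dt.getD n []) < pvW dt n := by
    by_cases hnil : dt.getD n [] = []
    · rw [hnil]
      have := pvW_pos dt n
      unfold pvPhi
      simpa using this
    · have hr1 : 1 ≤ pvRank dt n := pvRank_pos dt n hnil
      set C := pvCmax dt with hC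
      set r := pvRank dt n with hr
      have hbound : ∀ x ∈ (dt.getD n []).map (pvW dt), x ≤ (C + 1) ^ (r - 1) := by
        intro x hx
        rcases List.mem_map.mp hx with ⟨c, hc, rfl⟩
        have hcr : pvRank dt c < r := hch c hc
        exact Nat.pow_le_pow_right (by omega) (by omega)
      have hsum := List.sum_le_card_nsmul _ _ hbound
      have hlen : ((dt.getD n []).map (pvW dt)).length ≤ C := by
        rw [List.length_map]; exact pvCmax_bound dt n
      have hpow : (C + 1) ^ r = (C + 1) * (C + 1) ^ (r - 1) := by
        conv_lhs => rw [show r = (r - 1) + 1 by omega]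
        rw [pow_succ]
        ring
      unfold pvPhi pvW
      rw [← hr, ← hC, hpow]
      have hp1 : 1 ≤ (C + 1) ^ (r - 1) := Nat.one_le_pow _ _ (by omega)
      have : (((dt.getD n []).map (pvW dt)).length : Nat) • ((C + 1) ^ (r - 1))
          = ((dt.getD n []).map (pvW dt)).length * ((C + 1) ^ (r - 1)) := by
        simp [smul_eq_mul]
      rw [this] at hsum
      calc ((dt.getD n []).map (pvW dt)).sum
          ≤ ((dt.getD n []).map (pvW dt)).length * ((C + 1) ^ (r - 1)) := hsum
        _ ≤ C * ((C + 1) ^ (r - 1)) := Nat.mul_le_mul_right _ hlen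
        _ < (C + 1) * (C + 1) ^ (r - 1) := by
            rw [Nat.succ_mul]
            omega
  omega

lemma pvLoopB_eq (dt : PySem.Dict String (List String)) (R : PySem.Set String) (H : pvHR dt R) :
    ∀ (m : Nat) (st vis : List String), (∀ x ∈ st, x ∈ R) → pvPhi dt st ≤ m →
      pvLoopB dt st vis = vis ++ st.flatMap (pvRPost dt) := by
  intro m
  induction m with
  | zero =>
      intro st vis _ hphi
      cases st with
      | nil => rw [pvLoopB]; simp
      | cons n st =>
          exfalso
          have h1 := pvW_pos dt n
          have : pvPhi dt (n :: st) = pvW dt n + pvPhi dt st := by unfold pvPhi; simp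
          omega
  | succ m ih =>
      intro st vis hst hphi
      cases st with
      | nil => rw [pvLoopB]; simp
      | cons n st =>
          rw [pvLoopB]
          have hnR : n ∈ R := hst n (by simp)
          have hch : ∀ c ∈ dt.getD n [], pvRank dt c < pvRank dt n :=
            fun c hc => (H n hnR c hc).1
          have hguard := pvPhi_step dt n hch st
          rw [dif_pos hguard]
          have hphi' : pvPhi dt ((dt.getD n []).reverse ++ st) ≤ m := by omega
          have hst' : ∀ x ∈ (dt.getD n []).reverse ++ st, x ∈ R := by
            intro x hx
            rcases List.mem_append.mp hx with hx | hx
            · exact (H n hnR x (List.mem_reverse.mp hx)).2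
            · exact hst x (by simp [hx])
          rw [ih _ _ hst' hphi']
          rw [List.flatMap_cons, pvRPost_eq dt n hch, List.flatMap_append]
          simp [List.append_assoc]

-- ---------- set lemmas ----------
lemma set_update_subset (t : List String) : ∀ (s : PySem.Set String), (∀ x ∈ t, x ∈ s) →
    PySem.Set.update s t = s := by
  induction t with
  | nil => intro s _; rfl
  | cons x t iht =>
      intro s hs
      show PySem.Set.update (s.add x) t = s
      rw [PySem.Set.add_of_mem (hs x (by simp))]
      exact iht s (fun y hy => hs y (by simp [hy]))

-- ---------- dict lemmas ----------
lemma insert_getD_self_of_mem (d : PySem.Dict String (PySem.Set String)) (k : String)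
    (dflt : PySem.Set String) (hnd : d.keys.Nodup) (hk : k ∈ d.keys) :
    d.insert k (d.getD k dflt) = d := by
  have hc : d.contains k = true := (PySem.Dict.contains_iff_mem_keys d k).mpr hk
  apply PySem.Dict.ext
  show (d.insert k (d.getD k dflt)).items = d.items
  unfold PySem.Dict.insert
  rw [if_pos hc]
  show (d.items.map fun p => if (p.1 == k) = true then (k, d.getD k dflt) else p) = d.items
  have : ∀ p ∈ d.items, (if (p.1 == k) = true then (k, d.getD k dflt) else p) = p := by
    intro p hp
    by_cases hpk : p.1 = k
    · rw [if_pos (by simp [hpk])]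
      have hval : d.getD p.1 dflt = p.2 := by
        have : (p.1, p.2) ∈ d.items := by simpa using hp
        exact PySem.Dict.getD_of_mem_items d this hnd dflt
      rw [← hpk, hval]
    · rw [if_neg (by simp [hpk])]
  rw [List.map_congr_left this]
  simp

lemma modify_modify_self (d : PySem.Dict String (PySem.Set String))
    (k : String) (g f : PySem.Set String → PySem.Set String) :
    (d.modify k PySem.Set.empty f).modify k PySem.Set.empty g
      = d.modify k PySem.Set.empty (fun s => g (f s)) := by
  unfold PySem.Dict.modify
  rw [PySem.Dict.getD_insert_self, PySem.Dict.insert_insert_self]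

lemma foldIfAdd (q : String → Bool) (k : String) :
    ∀ (l : List String) (d : PySem.Dict String (PySem.Set String)),
      d.keys.Nodup → k ∈ d.keys →
      l.foldl (fun d x => if q x then d.modify k PySem.Set.empty (fun s => s.add x) else d) d
        = d.modify k PySem.Set.empty (fun s => PySem.Set.update s (l.filter q)) := by
  intro l
  induction l with
  | nil =>
      intro d hnd hk
      show d = d.modify k PySem.Set.empty (fun s => PySem.Set.update s [])
      show d = d.insert k (d.getD k PySem.Set.empty)
      rw [insert_getD_self_of_mem d k _ hnd hk]
  | cons x l ih =>
      intro d hnd hk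
      by_cases hq : q x
      · simp only [List.foldl_cons, List.filter_cons, hq, if_pos]
        have hd' : (d.modify k PySem.Set.empty (fun s => s.add x)).keys.Nodup := by
          show (d.insert k _).keys.Nodup
          exact PySem.Dict.nodup_keys_insert d k _ hnd
        have hk' : k ∈ (d.modify k PySem.Set.empty (fun s => s.add x)).keys := by
          show k ∈ (d.insert k _).keys
          rw [PySem.Dict.mem_keys_insert]
          left; rfl
        rw [ih _ hd' hk', modify_modify_self]
        rfl
      · simp only [List.foldl_cons, List.filter_cons, hq]
        simp only [Bool.false_eq_true, if_false]
        exact ih d hnd hk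

-- getD of a fold of inserts whose value depends only on the key
lemma getD_foldl_insertV (v : String → PySem.Set String) :
    ∀ (l : List String) (d : PySem.Dict String (PySem.Set String)) (k : String),
      (l.foldl (fun d n => d.insert n (v n)) d).getD k PySem.Set.empty
        = if k ∈ l then v k else d.getD k PySem.Set.empty := by
  intro l
  induction l with
  | nil => intro d k; simp
  | cons n l ih =>
      intro d k
      simp only [List.foldl_cons]
      rw [ih]
      by_cases hkl : k ∈ l
      · rw [if_pos hkl, if_pos (by simp [hkl])]
      · rw [if_neg hkl, PySem.Dict.getD_insert]
        by_cases hkn : k = n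
        · rw [if_pos hkn, if_pos (by simp [hkn]), hkn]
        · rw [if_neg hkn, if_neg (by simp [hkl, hkn])]

-- getD of a fold of update-modifies, from a dict whose k-entry is empty or already final
lemma getD_foldl_modifyU (fl : String → List String) :
    ∀ (l : List String) (d : PySem.Dict String (PySem.Set String)) (k : String),
      (d.getD k PySem.Set.empty = PySem.Set.empty ∨
        d.getD k PySem.Set.empty = PySem.Set.update PySem.Set.empty (fl k)) →
      (l.foldl (fun d n => d.modify n PySem.Set.empty (fun s => PySem.Set.update s (fl n))) d).getD k PySem.Set.empty
        = if k ∈ l then PySem.Set.update PySem.Set.empty (fl k)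
          else d.getD k PySem.Set.empty := by
  intro l
  induction l with
  | nil => intro d k _; simp
  | cons n l ih =>
      intro d k hd
      simp only [List.foldl_cons]
      have hstep : ∀ k', (d.modify n PySem.Set.empty (fun s => PySem.Set.update s (fl n))).getD k' PySem.Set.empty
          = if k' = n then PySem.Set.update (d.getD n PySem.Set.empty) (fl n)
            else d.getD k' PySem.Set.empty := by
        intro k'
        exact PySem.Dict.getD_modify d n k' PySem.Set.empty _
      by_cases hkn : k = n
      · subst hkn
        have hval : (d.modify k PySem.Set.empty (fun s => PySem.Set.update s (fl k))).getD k PySem.Set.empty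
            = PySem.Set.update PySem.Set.empty (fl k) := by
          rw [hstep k, if_pos rfl]
          rcases hd with hd | hd
          · rw [hd]
          · rw [hd]
            apply set_update_subset
            intro x hx
            rw [PySem.Set.mem_update]
            right; exact hx
        rw [ih _ k (Or.inr hval)]
        rw [hval]
        simp
      · have hval : (d.modify n PySem.Set.empty (fun s => PySem.Set.update s (fl n))).getD k PySem.Set.empty
            = d.getD k PySem.Set.empty := by rw [hstep k, if_neg hkn]
        rw [ih _ k (by rw [hval]; exact hd), hval]
        by_cases hkl : k ∈ l
        · rw [if_pos hkl, if_pos (by simp [hkl])]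
        · rw [if_neg hkl, if_neg (by simp [hkl, hkn])]

-- fold congruence under an invariant
lemma foldl_congr_inv {α δ : Type} (l : List α) (f g : δ → α → δ) (I : δ → Prop) (d : δ)
    (hI : I d) (hstep : ∀ d a, a ∈ l → I d → f d a = g d a ∧ I (g d a)) :
    l.foldl f d = l.foldl g d := by
  induction l generalizing d with
  | nil => rfl
  | cons a l ih =>
      have h1 := hstep d a (by simp) hI
      simp only [List.foldl_cons]
      rw [h1.1]
      exact ih (g d a) h1.2 (fun d' a' ha' hI' => hstep d' a' (by simp [ha']) hI')

lemma keys_modify_mem (d : PySem.Dict String (PySem.Set String)) (b : String)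
    (g : PySem.Set String → PySem.Set String) (hb : b ∈ d.keys) :
    (d.modify b PySem.Set.empty g).keys = d.keys := by
  unfold PySem.Dict.modify
  exact PySem.Dict.keys_insert_of_contains d _ ((PySem.Dict.contains_iff_mem_keys d b).mpr hb)

lemma ofList_names_eq_update (names : List String) :
    PySem.Set.update (PySem.Set.ofList names) names = PySem.Set.ofList names := by
  apply set_update_subset
  intro x hx
  exact (PySem.Set.mem_ofList names x).mpr hx

-- ---------- the two local passes build the same dict ----------
lemma local_eq (nm : PySem.Dict String (List String)) (idom : PySem.Dict String (Option String))
    (names : List String) :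
    names.foldl (fun d bn =>
        (nm.getD bn []).foldl (fun d nb =>
          if pvIdomGet idom nb != some bn then d.modify bn PySem.Set.empty (fun s => s.add nb) else d) d)
      (names.foldl (fun (d : PySem.Dict String (PySem.Set String)) n => d.insert n PySem.Set.empty) PySem.Dict.empty)
    = names.foldl (fun d n =>
        d.insert n (PySem.Set.ofList ((nm.getD n []).filter (fun s => pvIdomGet idom s != some n))))
        PySem.Dict.empty := by
  have hkeys0 : (names.foldl (fun (d : PySem.Dict String (PySem.Set String)) n => d.insert n PySem.Set.empty) PySem.Dict.empty).keys
      = PySem.Set.ofList names := by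
    rw [PySem.Dict.keys_foldl_insert names (fun _ _ => PySem.Set.empty) PySem.Dict.empty]
    rw [PySem.Set.ofList_eq_foldl]
    rfl
  have hstep1 := foldl_congr_inv names
    (fun d bn => (nm.getD bn []).foldl (fun d nb =>
        if pvIdomGet idom nb != some bn then d.modify bn PySem.Set.empty (fun s => s.add nb) else d) d)
    (fun d bn => d.modify bn PySem.Set.empty
        (fun s => PySem.Set.update s ((nm.getD bn []).filter (fun s => pvIdomGet idom s != some bn))))
    (fun d => d.keys = PySem.Set.ofList names)
    (names.foldl (fun (d : PySem.Dict String (PySem.Set String)) n => d.insert n PySem.Set.empty) PySem.Dict.empty)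
    hkeys0
    (by
      intro d bn hbn hI
      have hnd : d.keys.Nodup := by rw [hI]; exact PySem.Set.nodup_ofList names
      have hkm : bn ∈ d.keys := by rw [hI]; exact (PySem.Set.mem_ofList names bn).mpr hbn
      refine ⟨foldIfAdd _ bn _ d hnd hkm, ?_⟩
      show (d.modify bn PySem.Set.empty _).keys = _
      rw [keys_modify_mem d bn _ hkm, hI])
  rw [hstep1]
  -- now compare the modify-fold with the direct insert-fold, via items
  apply PySem.Dict.ext
  have hkeysL : (names.foldl (fun d bn => d.modify bn PySem.Set.empty
      (fun s => PySem.Set.update s ((nm.getD bn []).filter (fun s => pvIdomGet idom s != some bn))))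
      (names.foldl (fun (d : PySem.Dict String (PySem.Set String)) n => d.insert n PySem.Set.empty) PySem.Dict.empty)).keys
      = PySem.Set.ofList names := by
    rw [PySem.Dict.keys_foldl_modify names PySem.Set.empty
      (fun _ bn s => PySem.Set.update s ((nm.getD bn []).filter (fun s => pvIdomGet idom s != some bn)))]
    rw [hkeys0, ofList_names_eq_update]
  have hkeysR : (names.foldl (fun d n =>
      d.insert n (PySem.Set.ofList ((nm.getD n []).filter (fun s => pvIdomGet idom s != some n))))
      PySem.Dict.empty).keys = PySem.Set.ofList names := by
    rw [PySem.Dict.keys_foldl_insert names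
      (fun _ n => PySem.Set.ofList ((nm.getD n []).filter (fun s => pvIdomGet idom s != some n)))
      PySem.Dict.empty]
    rw [PySem.Set.ofList_eq_foldl]
    rfl
  rw [PySem.Dict.items_eq_map_keys _ (by rw [hkeysL]; exact PySem.Set.nodup_ofList names) PySem.Set.empty,
    PySem.Dict.items_eq_map_keys _ (by rw [hkeysR]; exact PySem.Set.nodup_ofList names) PySem.Set.empty,
    hkeysL, hkeysR]
  apply List.map_congr_left
  intro k hk
  have hkn : k ∈ names := (PySem.Set.mem_ofList names k).mp hk
  have hgetd0 : ∀ k', (names.foldl (fun (d : PySem.Dict String (PySem.Set String)) n => d.insert n PySem.Set.empty) PySem.Dict.empty).getD k' PySem.Set.empty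
      = PySem.Set.empty := by
    intro k'
    rw [getD_foldl_insertV (fun _ => PySem.Set.empty) names PySem.Dict.empty k']
    split <;> simp
  rw [getD_foldl_modifyU (fun n => (nm.getD n []).filter (fun s => pvIdomGet idom s != some n))
    names _ k (Or.inl (hgetd0 k))]
  rw [getD_foldl_insertV (fun n => PySem.Set.ofList ((nm.getD n []).filter (fun s => pvIdomGet idom s != some n)))
    names PySem.Dict.empty k]
  rw [if_pos hkn, if_pos hkn]
  rw [PySem.Set.ofList_eq_foldl]
  rfl

-- ===== VERDICT (by name: the statement is the Claim_ definition above) =====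
theorem get_dominance_frontier_spec : Claim_equal_get_dominance_frontier := by
  intro blocks next_map immediate_dom dom_tree hDom hPre
  unfold Spec_get_dominance_frontier
  obtain ⟨hname, hacy, hreach⟩ := hPre
  simp only [get_dominance_frontier, get_dominance_frontier_alt]
  set nm := (PySem.Dict.ofList next_map : PySem.Dict String (List String)) with hnm
  set idom := (PySem.Dict.ofList immediate_dom : PySem.Dict String (Option String)) with hidom
  set dt := (PySem.Dict.ofList dom_tree : PySem.Dict String (List String)) with hdt
  set names := blocks.map (fun b => (PySem.Dict.ofList b).getD "name" "") with hnames
  set roots := (idom.items.filter (fun rp => rp.2.isNone)).map (fun rp => rp.1) with hroots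
  set R := pvReach immediate_dom dom_tree with hR
  have hRclosed : ∀ x ∈ R, ∀ c ∈ dt.getD x [], c ∈ R := by
    intro x hx c hc
    exact pvClosFrom_closed dt (pvRoots immediate_dom) x hx c hc
  have hH : pvHR dt R := by
    intro n hn c hc
    exact ⟨pvRank_lt_of_child dt n c hc (hacy n hn c hc), hRclosed n hn c hc⟩
  have hrootsR : ∀ x ∈ roots, x ∈ R := by
    intro x hx
    exact mem_pvClosFrom_of_mem dt (pvRoots immediate_dom) x hx
  -- the two traversal orders coincide
  have hposter : idom.items.foldl (fun po rp =>
      if rp.2.isNone then pvPostA dt (dom_tree.length + 1) rp.1 po else po) []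
      = roots.flatMap (pvPost dt) := by
    rw [pvRootsFold dt R hH _ (by have h := pvKlen_le dom_tree; rw [← hdt] at h; omega) idom.items []
      (by
        intro p hp hp2
        apply hrootsR
        rw [hroots]
        exact List.mem_map_of_mem (List.mem_filter.mpr ⟨hp, hp2⟩))]
    rw [List.nil_append]
  have hvisit : (pvLoopB dt roots.reverse []).reverse = roots.flatMap (pvPost dt) := by
    rw [pvLoopB_eq dt R hH (pvPhi dt roots.reverse) roots.reverse []
      (fun x hx => hrootsR x (List.mem_reverse.mp hx)) le_rfl]
    simp only [List.nil_append]
    rw [List.reverse_flatMap, List.reverse_reverse]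
    apply List.flatMap_congr
    intro n _
    show (pvRPost dt n).reverse = pvPost dt n
    unfold pvRPost
    rw [List.reverse_reverse]
  -- local passes agree; the upward folds are the same function over the same order
  rw [local_eq nm idom names, hposter, hvisit]
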